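-- pv_equiv track=rewrite | github.com/Vinod3d/dsa-in-python | 01_Flowchart_and_Pseudocode/pattern/6_pyramid.py | pyramid
-- ===== SOURCE A (Python) =====
-- def pyramid(n):
-- 	list = []
-- 	for i in range(0, n):
-- 		line = ""
-- 		for j in range(0, n-i-1):
-- 			line += " "
-- 		for k in range(0, 2*i+1):
-- 			line += "*"
-- 		list.append(line)
-- 	return list
-- ===== SOURCE B (Python) =====
-- def pyramid(n):
--     return [" " * (n - i - 1) + "*" * (2 * i + 1) for i in range(n)]
-- ===== Notes on version B (the rewrite author's own statement) =====
-- stated objective: idiomatic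
-- what changed: Each row is produced by a closed-form string expression ' '*(n-i-1)+'*'*(2*i+1) in a comprehension, removing both inner char-by-char accumulation loops.
import Mathlib
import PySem

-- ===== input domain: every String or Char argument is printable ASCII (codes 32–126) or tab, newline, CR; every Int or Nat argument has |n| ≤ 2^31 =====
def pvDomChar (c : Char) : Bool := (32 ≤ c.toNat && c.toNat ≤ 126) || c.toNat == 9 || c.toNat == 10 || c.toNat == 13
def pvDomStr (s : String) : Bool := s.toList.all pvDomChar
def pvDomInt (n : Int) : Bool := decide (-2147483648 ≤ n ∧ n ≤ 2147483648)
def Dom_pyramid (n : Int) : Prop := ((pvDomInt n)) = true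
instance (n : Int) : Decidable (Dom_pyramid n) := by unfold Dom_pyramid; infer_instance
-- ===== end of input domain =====

-- ===== PORT A =====
-- B builds each row by a closed-form string expression instead of char-by-char accumulation (idiomatic).
def pyramid (n : Int) : List String :=
  (PySem.List.pyRange 0 n 1).foldl (fun acc i =>
    let line : String := ""
    let line := (PySem.List.pyRange 0 (n - i - 1) 1).foldl (fun l _ => l ++ " ") line
    let line := (PySem.List.pyRange 0 (2 * i + 1) 1).foldl (fun l _ => l ++ "*") line
    acc ++ [line]) []

-- ===== PORT B =====
def pyramid_alt (n : Int) : List String :=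
  (PySem.List.pyRange 0 n 1).map (fun i =>
    String.ofList (List.replicate (n - i - 1).toNat ' ' ++ List.replicate (2 * i + 1).toNat '*'))

-- ===== PRECONDITION & SPEC =====
def Spec_pyramid (n : Int) (out : List String) : Prop := out = pyramid_alt n
instance (n : Int) (out : List String) : Decidable (Spec_pyramid n out) := by unfold Spec_pyramid; infer_instance

-- ===== CLAIM (what is proved, stated in full; the proofs are below) =====
def Claim_equal_pyramid : Prop := ∀ (n : Int), Dom_pyramid n → Spec_pyramid n (pyramid n)

-- ===== LEMMAS AND PROOFS =====

-- ===== VERDICT (by name: the statement is the Claim_ definition above) =====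
-- char-by-char accumulation over any list equals appending a replicate of its length
theorem foldl_append_char (xs : List Int) (s : String) (c : Char) :
    xs.foldl (fun l _ => l ++ String.ofList [c]) s = s ++ String.ofList (List.replicate xs.length c) := by
  induction xs generalizing s with
  | nil => apply String.toList_injective; simp
  | cons x t ih =>
      simp only [List.foldl_cons, ih, List.length_cons, List.replicate_succ]
      apply String.toList_injective
      simp

-- foldl that only appends one element per step is a map
theorem foldl_append_map (xs : List Int) (acc : List String) (f : Int → String) :
    xs.foldl (fun a i => a ++ [f i]) acc = acc ++ xs.map f := by
  induction xs generalizing acc with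
  | nil => simp
  | cons x t ih => simp [ih]

theorem pyramid_spec : Claim_equal_pyramid := by
  intro n _
  unfold Spec_pyramid pyramid pyramid_alt
  rw [foldl_append_map]
  simp only [List.nil_append]
  apply List.map_congr_left
  intro i _
  have key : ∀ (m k : Int),
      (PySem.List.pyRange 0 k 1).foldl (fun l _ => l ++ String.ofList ['*'])
        ((PySem.List.pyRange 0 m 1).foldl (fun l _ => l ++ String.ofList [' ']) "")
      = String.ofList (List.replicate m.toNat ' ' ++ List.replicate k.toNat '*') := by
    intro m k
    rw [foldl_append_char, foldl_append_char]
    simp only [PySem.List.length_pyRange_one, Int.sub_zero]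
    apply String.toList_injective
    simp [String.toList_ofList]
  exact key (n - i - 1) (2 * i + 1)
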